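-- pv_equiv track=rewrite | github.com/yongjae5717/TIL | Backjoon/silver/2529.py | solution
-- ===== SOURCE A (Python) =====
-- from itertools import permutations
--
-- def solution(k, array):
--     result = list()
--     number = list(i for i in range(10))
--     for permutation in permutations(number, k + 1):
--         flag = True
--         for i in range(k):
--             if array[i] == "<":
--                 if permutation[i] < permutation[i + 1]:
--                     continue
--                 flag = False
--                 break
--             else:
--                 if permutation[i] > permutation[i + 1]:
--                     continue
--                 flag = False
--                 break
--         if flag:
--             result.append("".join(map(str, permutation)))
--     return [max(result), min(result)]
-- ===== SOURCE B (Python) =====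
-- def solution(k, array):
--     # Backtracking: assign digits greedily (largest-first for the max answer,
--     # smallest-first for the min answer); first complete assignment found is the answer.
--     def ok(acc, d):
--         if not acc:
--             return True
--         prev = acc[-1]
--         return prev < d if array[len(acc) - 1] == "<" else prev > d
--
--     def dfs(acc, digits):
--         if len(acc) == k + 1:
--             return acc
--         for d in digits:
--             if d not in acc and ok(acc, d):
--                 r = dfs(acc + [d], digits)
--                 if r is not None:
--                     return r
--         return None
--
--     mx = dfs([], list(range(9, -1, -1)))
--     mn = dfs([], list(range(10)))
--     return ["".join(map(str, mx)), "".join(map(str, mn))]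
-- ===== Notes on version B (the rewrite author's own statement) =====
-- stated objective: faster
-- what changed: A enumerates all P(10,k+1) digit permutations, filters them by the inequality chain and takes max/min of the string list; B runs two greedy backtracking (DFS) searches over digits 0-9 - largest-first for the max answer, smallest-first for the min - returning the first complete valid assignment, which is the lexicographic extremum.
import Mathlib
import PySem

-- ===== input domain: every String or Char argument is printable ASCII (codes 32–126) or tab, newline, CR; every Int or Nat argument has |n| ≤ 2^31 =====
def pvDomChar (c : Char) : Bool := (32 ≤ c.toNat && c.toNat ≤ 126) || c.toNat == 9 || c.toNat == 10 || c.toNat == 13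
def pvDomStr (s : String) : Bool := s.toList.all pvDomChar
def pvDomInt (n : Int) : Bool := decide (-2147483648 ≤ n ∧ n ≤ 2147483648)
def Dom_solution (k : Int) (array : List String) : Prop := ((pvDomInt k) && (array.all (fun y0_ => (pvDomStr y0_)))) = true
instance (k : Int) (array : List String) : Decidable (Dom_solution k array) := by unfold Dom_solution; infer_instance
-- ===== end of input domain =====

-- B replaces A's brute-force scan of all P(10,k+1) digit permutations by two greedy
-- backtracking searches (largest-first digits for the max answer, smallest-first for the min),
-- intended to be faster by avoiding the full enumeration.

-- ===== PORT A =====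
-- "".join(map(str, p))
def joinDigits (p : List Int) : String := PySem.Str.join "" (p.map PySem.Int.toStr)

-- A's inner flag loop: for i in range(k), compare p[i] with p[i+1] as array[i] demands, break on failure
def chkA (array : List String) (p : List Int) : Nat → Nat → Bool
  | _, 0 => true
  | i, n+1 =>
    if array.getD i "" == "<" then
      if p.getD i 0 < p.getD (i+1) 0 then chkA array p (i+1) n else false
    else
      if p.getD i 0 > p.getD (i+1) 0 then chkA array p (i+1) n else false

def solution (k : Int) (array : List String) : List String :=
  let number := PySem.List.pyRange 0 10 1
  let result := ((PySem.List.permutations number (k+1).toNat).filter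
      (fun p => chkA array p 0 k.toNat)).map joinDigits
  -- [max(result), min(result)]; Pre_ guarantees result ≠ [] (Python raises on an empty list)
  [(PySem.List.max? result (fun s => s)).getD "",
   (PySem.List.min? result (fun s => s)).getD ""]

-- ===== PORT B =====
-- ok(acc, d): the candidate digit respects the required comparison with the last placed digit
def stepOK (array : List String) (acc : List Int) (c : Int) : Bool :=
  match acc.getLast? with
  | none => true
  | some prev =>
    if array.getD (acc.length - 1) "" == "<" then decide (prev < c) else decide (prev > c)

-- dfs(acc, digits): try the candidates in the given order, first complete assignment wins.
-- n = (k+1) - len(acc) positions still to fill; cs = candidates not yet tried at this level.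
def dfsB (array : List String) (digits : List Int) : Nat → List Int → List Int → Option (List Int)
  | 0, _, acc => some acc
  | _+1, [], _ => none
  | n+1, c :: cs, acc =>
    if !acc.contains c && stepOK array acc c then
      match dfsB array digits n digits (acc ++ [c]) with
      | some r => some r
      | none => dfsB array digits (n+1) cs acc
    else dfsB array digits (n+1) cs acc
  termination_by n cs => (n, cs.length)

def solution_alt (k : Int) (array : List String) : List String :=
  let asc := PySem.List.pyRange 0 10 1
  let desc := PySem.List.pyRange 9 (-1) (-1)
  let mx := dfsB array desc (k+1).toNat desc []
  let mn := dfsB array asc (k+1).toNat asc []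
  -- Pre_ guarantees both searches succeed (Python raises on None)
  [joinDigits (mx.getD []), joinDigits (mn.getD [])]

-- ===== PRECONDITION & SPEC =====
-- Pre_ excludes exactly the inputs on which A raises: k < -1 (ValueError from permutations),
-- k > 9 (result is empty, max([]) raises ValueError), and arrays shorter than k (IndexError).
def Pre_solution (k : Int) (array : List String) : Prop :=
  -1 ≤ k ∧ k ≤ 9 ∧ k ≤ PySem.List.len array
instance (k : Int) (array : List String) : Decidable (Pre_solution k array) := by
  unfold Pre_solution; infer_instance
def pvWitness_solution : Int × List String := (2, ["<", ">"])
def Spec_solution (k : Int) (array : List String) (out : List String) : Prop := out = solution_alt k array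
instance (k : Int) (array : List String) (out : List String) : Decidable (Spec_solution k array out) := by unfold Spec_solution; infer_instance

-- ===== CLAIM (what is proved, stated in full; the proofs are below) =====
def Claim_equal_solution : Prop := ∀ (k : Int) (array : List String), Dom_solution k array → Pre_solution k array → Spec_solution k array (solution k array)

-- ===== LEMMAS AND PROOFS =====

def digits09 : List Int := [0,1,2,3,4,5,6,7,8,9]
def desc09 : List Int := [9,8,7,6,5,4,3,2,1,0]

def pairOK (array : List String) (a b : Int) (i : Nat) : Bool :=
  if array.getD i "" == "<" then decide (a < b) else decide (a > b)

def ChainOK (array : List String) (p : List Int) : Prop :=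
  ∀ i, i + 1 < p.length → pairOK array (p.getD i 0) (p.getD (i+1) 0) i = true

def ValidExt (array : List String) (n : Nat) (p : List Int) : Prop :=
  p.length = n ∧ p.Nodup ∧ (∀ x ∈ p, x ∈ digits09) ∧ ChainOK array p

def ExtOf (array : List String) (digits : List Int) (n : Nat) (cs acc ext : List Int) : Prop :=
  ext.length = n ∧ (acc ++ ext).Nodup ∧ ChainOK array (acc ++ ext) ∧
  (∀ x ∈ ext, x ∈ digits) ∧ (∀ e, ext.head? = some e → e ∈ cs)

def LexLeK (digits : List Int) : List Int → List Int → Prop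
  | [], _ => True
  | _ :: _, [] => False
  | x :: xs, y :: ys => digits.idxOf x < digits.idxOf y ∨ (x = y ∧ LexLeK digits xs ys)

lemma chkA_iff (array : List String) (p : List Int) :
    ∀ n i, (chkA array p i n = true ↔
      ∀ j, j < n → pairOK array (p.getD (i+j) 0) (p.getD (i+j+1) 0) (i+j) = true) := by
  intro n
  induction n with
  | zero => intro i; simp [chkA]
  | succ n ih =>
    intro i
    have step : chkA array p i (n+1) = (pairOK array (p.getD i 0) (p.getD (i+1) 0) i && chkA array p (i+1) n) := by
      simp only [chkA, pairOK]
      split <;> (split <;> simp_all)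
    rw [step, Bool.and_eq_true, ih]
    constructor
    · rintro ⟨h0, hrest⟩ j hj
      cases j with
      | zero => simpa using h0
      | succ j =>
        have := hrest j (by omega)
        have e1 : i + 1 + j = i + (j+1) := by omega
        rw [e1] at this; exact this
    · intro h
      refine ⟨by simpa using h 0 (by omega), fun j hj => ?_⟩
      have := h (j+1) (by omega)
      have e1 : i + 1 + j = i + (j+1) := by omega
      rw [e1]; exact this

lemma getLast_getD {l : List Int} (h : l ≠ []) : l.getLast? = some (l.getD (l.length - 1) 0) := by
  rw [List.getLast?_eq_getElem?]
  rcases l with _|⟨x,xs⟩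
  · simp at h
  · simp [List.getD]

lemma chain_prefix {array : List String} {l t : List Int}
    (h : ChainOK array (l ++ t)) : ChainOK array l := by
  intro i hi
  have := h i (by simp; omega)
  rwa [List.getD_append _ _ _ _ (by omega), List.getD_append _ _ _ _ (by omega)] at this

lemma chain_snoc {array : List String} {acc : List Int} {c : Int} :
    ChainOK array (acc ++ [c]) ↔ ChainOK array acc ∧ stepOK array acc c = true := by
  constructor
  · intro h
    refine ⟨chain_prefix h, ?_⟩
    rcases eq_or_ne acc [] with rfl | hne
    · simp [stepOK]
    · have hlen : 1 ≤ acc.length := by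
        rcases acc with _|⟨x,xs⟩; · simp at hne
        simp
      have hp := h (acc.length - 1) (by simp; omega)
      rw [show acc.length - 1 + 1 = acc.length by omega] at hp
      rw [List.getD_append _ _ _ _ (by omega)] at hp
      rw [show ((acc ++ [c]).getD acc.length 0) = c by simp] at hp
      rw [stepOK, getLast_getD hne]
      simpa [pairOK] using hp
  · rintro ⟨hch, hst⟩ i hi
    simp only [List.length_append, List.length_cons, List.length_nil] at hi
    by_cases hlt : i + 1 < acc.length
    · rw [List.getD_append _ _ _ _ (by omega), List.getD_append _ _ _ _ (by omega)]
      exact hch i hlt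
    · have hie : i + 1 = acc.length := by omega
      have hne : acc ≠ [] := by intro hz; rw [hz] at hie; simp at hie
      rw [show i = acc.length - 1 by omega, show acc.length - 1 + 1 = acc.length by omega]
      rw [List.getD_append _ _ _ _ (by omega)]
      rw [show ((acc ++ [c]).getD acc.length 0) = c by simp]
      rw [stepOK, getLast_getD hne] at hst
      simpa [pairOK] using hst

lemma mem_perms : ∀ (r : Nat) (xs : List Int), xs.Nodup → ∀ p : List Int,
    (p ∈ PySem.List.permutations xs r ↔ (p.length = r ∧ p.Nodup ∧ ∀ a ∈ p, a ∈ xs)) := by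
  intro r
  induction r with
  | zero =>
    intro xs _ p
    rw [PySem.List.permutations.eq_1]
    constructor
    · rintro h; simp at h; subst h; simp
    · rintro ⟨h1, _, _⟩
      simp [List.length_eq_zero_iff.mp h1]
  | succ r ih =>
    intro xs hx p
    rw [PySem.List.permutations.eq_2]
    simp only [List.mem_flatMap, List.mem_range]
    constructor
    · rintro ⟨i, hi, hp⟩
      rw [List.getElem?_eq_getElem hi] at hp
      simp only [List.mem_map] at hp
      obtain ⟨q, hq, rfl⟩ := hp
      have hsub := List.eraseIdx_sublist (l := xs) (k := i)
      obtain ⟨hql, hqn, hqm⟩ := (ih _ (hsub.nodup hx) q).mp hq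
      refine ⟨by simp [hql], ?_, ?_⟩
      · refine List.nodup_cons.mpr ⟨?_, hqn⟩
        intro hmem
        obtain ⟨j, hj, hji, hje⟩ := List.mem_eraseIdx_iff_getElem.mp (hqm _ hmem)
        exact hji ((List.Nodup.getElem_inj_iff hx).mp hje)
      · intro a ha
        rcases List.mem_cons.mp ha with rfl | ha
        · exact List.getElem_mem hi
        · exact hsub.subset (hqm a ha)
    · rintro ⟨h1, h2, h3⟩
      rcases p with _|⟨a, q⟩; · simp at h1
      obtain ⟨i, hi, rfl⟩ := List.mem_iff_getElem.mp (h3 a (by simp))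
      refine ⟨i, hi, ?_⟩
      rw [List.getElem?_eq_getElem hi]
      simp only [List.mem_map]
      refine ⟨q, ?_, rfl⟩
      refine (ih _ ((List.eraseIdx_sublist _ _).nodup hx) q).mpr ⟨by simpa using h1, h2.of_cons, ?_⟩
      intro y hy
      refine List.mem_eraseIdx_iff_getElem.mpr ?_
      obtain ⟨j, hj, rfl⟩ := List.mem_iff_getElem.mp (h3 y (by simp [hy]))
      refine ⟨j, hj, ?_, rfl⟩
      intro hji; subst hji
      exact (List.nodup_cons.mp h2).1 hy

lemma dfs_prefix {array : List String} {digits : List Int} :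
    ∀ {n : Nat} {cs acc r : List Int}, dfsB array digits n cs acc = some r →
      ∃ ext, r = acc ++ ext ∧ ext.length = n := by
  intro n cs acc
  induction n, cs, acc using dfsB.induct array digits with
  | case1 cs acc => intro r h; rw [dfsB] at h; exact ⟨[], by simpa using h.symm, rfl⟩
  | case2 n cs => intro r h; rw [dfsB] at h; simp at h
  | case3 n c cs acc hcond r' hinner ih =>
    intro r h
    rw [dfsB, if_pos hcond, hinner] at h
    obtain rfl : r' = r := by simpa using h
    obtain ⟨ext, rfl, hlen⟩ := ih hinner
    exact ⟨c :: ext, by simp, by simp [hlen]⟩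
  | case4 n c cs acc hcond hinner ih1 ih2 =>
    intro r h
    rw [dfsB, if_pos hcond, hinner] at h
    obtain ⟨ext, rfl, hlen⟩ := ih2 h
    exact ⟨ext, rfl, hlen⟩
  | case5 n c cs acc hcond ih =>
    intro r h
    rw [dfsB, if_neg hcond] at h
    exact ih h

lemma dfs_sound {array : List String} {digits : List Int} :
    ∀ {n : Nat} {cs acc r : List Int}, dfsB array digits n cs acc = some r →
      (∀ x ∈ cs, x ∈ digits) → acc.Nodup → ChainOK array acc →
      r.length = acc.length + n ∧ r.Nodup ∧ ChainOK array r ∧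
        (∀ x ∈ r, x ∈ acc ∨ x ∈ digits) := by
  intro n cs acc
  induction n, cs, acc using dfsB.induct array digits with
  | case1 cs acc =>
    intro r h _ hnd hch
    rw [dfsB] at h
    obtain rfl : acc = r := by simpa using h
    exact ⟨by simp, hnd, hch, fun x hx => Or.inl hx⟩
  | case2 n cs => intro r h; rw [dfsB] at h; simp at h
  | case3 n c cs acc hcond r' hinner ih =>
    intro r h hcs hnd hch
    rw [dfsB, if_pos hcond, hinner] at h
    obtain rfl : r' = r := by simpa using h
    simp only [Bool.and_eq_true, Bool.not_eq_true'] at hcond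
    have hcmem : c ∈ digits := hcs c (by simp)
    have hc_not : c ∉ acc := by simpa [List.contains_eq_mem] using hcond.1
    have hnd' : (acc ++ [c]).Nodup := by
      simp [List.nodup_append, hnd]
      exact fun a ha hac => hc_not (hac ▸ ha)
    have hch' : ChainOK array (acc ++ [c]) := chain_snoc.mpr ⟨hch, hcond.2⟩
    obtain ⟨h1, h2, h3, h4⟩ := ih hinner (fun x hx => hx) hnd' hch'
    refine ⟨by simp at h1 ⊢; omega, h2, h3, fun x hx => ?_⟩
    rcases h4 x hx with hx' | hx'
    · rcases List.mem_append.mp hx' with hx'' | hx''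
      · exact Or.inl hx''
      · simp at hx''; subst hx''; exact Or.inr hcmem
    · exact Or.inr hx'
  | case4 n c cs acc hcond hinner ih1 ih2 =>
    intro r h hcs hnd hch
    rw [dfsB, if_pos hcond, hinner] at h
    exact ih2 h (fun x hx => hcs x (by simp [hx])) hnd hch
  | case5 n c cs acc hcond ih =>
    intro r h hcs hnd hch
    rw [dfsB, if_neg hcond] at h
    exact ih h (fun x hx => hcs x (by simp [hx])) hnd hch

lemma dfs_complete {array : List String} {digits : List Int} :
    ∀ {n : Nat} {cs acc : List Int}, dfsB array digits n cs acc = none →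
      ∀ ext, ¬ ExtOf array digits n cs acc ext := by
  intro n cs acc
  induction n, cs, acc using dfsB.induct array digits with
  | case1 cs acc => intro h; rw [dfsB] at h; simp at h
  | case2 n acc =>
    intro _ ext hext
    obtain ⟨h1, _, _, _, h5⟩ := hext
    rcases ext with _|⟨e, ext⟩; · simp at h1
    simpa using h5 e rfl
  | case3 n c cs acc hcond r' hinner ih =>
    intro h
    rw [dfsB, if_pos hcond, hinner] at h
    simp at h
  | case4 n c cs acc hcond hinner ih1 ih2 =>
    intro h ext hext
    rw [dfsB, if_pos hcond, hinner] at h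
    obtain ⟨h1, h2, h3, h4, h5⟩ := hext
    rcases ext with _|⟨e, ext⟩; · simp at h1
    rcases List.mem_cons.mp (h5 e rfl) with rfl | hecs
    · refine ih1 hinner ext ⟨by simpa using h1, ?_, ?_, ?_, ?_⟩
      · rw [List.append_assoc]; simpa using h2
      · rw [List.append_assoc]; simpa using h3
      · exact fun x hx => h4 x (by simp [hx])
      · exact fun e' he' => h4 e' (List.mem_cons_of_mem _ (List.mem_of_mem_head? he'))
    · exact ih2 h (e :: ext) ⟨h1, h2, h3, h4, fun e' he' => by
        obtain rfl : e = e' := by simpa using he'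
        exact hecs⟩
  | case5 n c cs acc hcond ih =>
    intro h ext hext
    rw [dfsB, if_neg hcond] at h
    obtain ⟨h1, h2, h3, h4, h5⟩ := hext
    rcases ext with _|⟨e, ext⟩; · simp at h1
    rcases List.mem_cons.mp (h5 e rfl) with rfl | hecs
    · apply hcond
      simp only [Bool.and_eq_true, Bool.not_eq_true']
      constructor
      · have := h2
        simp [List.nodup_append] at this
        simpa [List.contains_eq_mem] using fun hc => (this.2.2 e hc).1 rfl
      · have : ChainOK array (acc ++ [e]) := chain_prefix (t := ext) (by
          rw [List.append_assoc]; simpa using h3)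
        exact (chain_snoc.mp this).2
    · exact ih h (e :: ext) ⟨h1, h2, h3, h4, fun e' he' => by
        obtain rfl : e = e' := by simpa using he'
        exact hecs⟩

lemma idx_lt_of_suffix {digits pre cs : List Int} {c e : Int} (hnd : digits.Nodup)
    (hsplit : digits = pre ++ c :: cs) (he : e ∈ cs) :
    digits.idxOf c < digits.idxOf e := by
  subst hsplit
  have hnd' := List.nodup_append.mp hnd
  have hcpre : c ∉ pre := fun hc => hnd'.2.2 c hc c (by simp) rfl
  have hepre : e ∉ pre := fun hc => hnd'.2.2 e hc e (by simp [he]) rfl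
  have hec : e ≠ c := by
    intro rfl'
    exact (List.nodup_cons.mp hnd'.2.1).1 (rfl' ▸ he)
  rw [List.idxOf_append, List.idxOf_append, if_neg hcpre, if_neg hepre]
  have h1 : List.idxOf c (c :: cs) = 0 := by simp
  have h2 : List.idxOf e (c :: cs) = List.idxOf e cs + 1 := by
    simp [List.idxOf_cons, beq_eq_false_iff_ne.mpr (Ne.symm hec)]
  omega

lemma dfs_min {array : List String} {digits : List Int} (hd : digits.Nodup) :
    ∀ {n : Nat} {cs acc r : List Int}, dfsB array digits n cs acc = some r →
      (∃ pre, digits = pre ++ cs) →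
      ∀ ext, ExtOf array digits n cs acc ext → LexLeK digits (r.drop acc.length) ext := by
  intro n cs acc
  induction n, cs, acc using dfsB.induct array digits with
  | case1 cs acc =>
    intro r h _ ext hext
    rw [dfsB] at h
    obtain rfl : acc = r := by simpa using h
    obtain rfl : ext = [] := List.length_eq_zero_iff.mp hext.1
    simp [LexLeK]
  | case2 n cs => intro r h; rw [dfsB] at h; simp at h
  | case3 n c cs acc hcond r' hinner ih =>
    intro r h hsuf ext hext
    rw [dfsB, if_pos hcond, hinner] at h
    obtain rfl : r = r' := by simpa using h.symm
    obtain ⟨rest, hre, hrlen⟩ := dfs_prefix hinner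
    obtain ⟨h1, h2, h3, h4, h5⟩ := hext
    rcases ext with _|⟨e, ext⟩; · simp at h1
    have hdrop : r.drop acc.length = c :: rest := by
      rw [hre, List.append_assoc]; simp [List.drop_left (l₁ := acc) (l₂ := c :: rest)]
    rw [hdrop]
    rcases List.mem_cons.mp (h5 e rfl) with rfl | hecs
    · right
      refine ⟨rfl, ?_⟩
      have : r.drop (acc ++ [e]).length = rest := by rw [hre]; exact List.drop_left
      rw [← this]
      refine ih hinner ⟨[], rfl⟩ ext ⟨by simpa using h1, ?_, ?_, ?_, ?_⟩
      · rw [List.append_assoc]; simpa using h2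
      · rw [List.append_assoc]; simpa using h3
      · exact fun x hx => h4 x (by simp [hx])
      · exact fun e' he' => h4 e' (List.mem_cons_of_mem _ (List.mem_of_mem_head? he'))
    · left
      obtain ⟨pre, hpre⟩ := hsuf
      exact idx_lt_of_suffix hd hpre hecs
  | case4 n c cs acc hcond hinner ih1 ih2 =>
    intro r h hsuf ext hext
    rw [dfsB, if_pos hcond, hinner] at h
    obtain ⟨h1, h2, h3, h4, h5⟩ := hext
    rcases ext with _|⟨e, ext⟩; · simp at h1
    rcases List.mem_cons.mp (h5 e rfl) with rfl | hecs
    · exfalso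
      refine dfs_complete hinner ext ⟨by simpa using h1, ?_, ?_, ?_, ?_⟩
      · rw [List.append_assoc]; simpa using h2
      · rw [List.append_assoc]; simpa using h3
      · exact fun x hx => h4 x (by simp [hx])
      · exact fun e' he' => h4 e' (List.mem_cons_of_mem _ (List.mem_of_mem_head? he'))
    · obtain ⟨pre, hpre⟩ := hsuf
      refine ih2 h ⟨pre ++ [c], by simpa using hpre⟩ (e :: ext) ⟨h1, h2, h3, h4, fun e' he' => by
        obtain rfl : e = e' := by simpa using he'
        exact hecs⟩
  | case5 n c cs acc hcond ih =>
    intro r h hsuf ext hext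
    rw [dfsB, if_neg hcond] at h
    obtain ⟨h1, h2, h3, h4, h5⟩ := hext
    rcases ext with _|⟨e, ext⟩; · simp at h1
    rcases List.mem_cons.mp (h5 e rfl) with rfl | hecs
    · exfalso
      apply hcond
      simp only [Bool.and_eq_true, Bool.not_eq_true']
      constructor
      · have := h2
        simp [List.nodup_append] at this
        simpa [List.contains_eq_mem] using fun hc => (this.2.2 e hc).1 rfl
      · have : ChainOK array (acc ++ [e]) := chain_prefix (t := ext) (by
          rw [List.append_assoc]; simpa using h3)
        exact (chain_snoc.mp this).2
    · obtain ⟨pre, hpre⟩ := hsuf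
      refine ih h ⟨pre ++ [c], by simpa using hpre⟩ (e :: ext) ⟨h1, h2, h3, h4, fun e' he' => by
        obtain rfl : e = e' := by simpa using he'
        exact hecs⟩

def digChar (x : Int) : Char := Char.ofNat (48 + x.toNat)

lemma toList_joinDigits {p : List Int} (hp : ∀ x ∈ p, x ∈ digits09) :
    (joinDigits p).toList = p.map digChar := by
  rw [joinDigits, PySem.Str.toList_join]
  have h : List.map String.toList (p.map PySem.Int.toStr) = List.map (fun c => [c]) (p.map digChar) := by
    simp only [List.map_map]
    apply List.map_congr_left
    intro x hx
    have hm : x ∈ digits09 := hp x hx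
    fin_cases hm <;> decide
  rw [h]
  have : ("" : String).toList = [] := rfl
  rw [this, PySem.Chars.join_nil_singletons]

lemma idx_asc {x y : Int} (hx : x ∈ digits09) (hy : y ∈ digits09)
    (h : digits09.idxOf x < digits09.idxOf y) : digChar x < digChar y := by
  fin_cases hx <;> fin_cases hy <;> revert h <;> decide

lemma idx_desc {x y : Int} (hx : x ∈ digits09) (hy : y ∈ digits09)
    (h : desc09.idxOf x < desc09.idxOf y) : digChar y < digChar x := by
  fin_cases hx <;> fin_cases hy <;> revert h <;> decide

lemma lexLeK_le {p q : List Int} (h : LexLeK digits09 p q) (_hlen : p.length = q.length)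
    (hp : ∀ x ∈ p, x ∈ digits09) (hq : ∀ x ∈ q, x ∈ digits09) :
    joinDigits p ≤ joinDigits q := by
  rw [String.le_iff_toList_le, toList_joinDigits hp, toList_joinDigits hq]
  have key : ∀ (p q : List Int), LexLeK digits09 p q → (∀ x ∈ p, x ∈ digits09) →
      (∀ x ∈ q, x ∈ digits09) →
      p.map digChar = q.map digChar ∨ List.Lex (· < ·) (p.map digChar) (q.map digChar) := by
    intro p
    induction p with
    | nil =>
      intro q _ _ _
      rcases q with _|⟨y, ys⟩
      · left; rfl
      · right; exact List.Lex.nil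
    | cons x xs ih =>
      intro q h hp hq
      rcases q with _|⟨y, ys⟩; · exact absurd h (by simp [LexLeK])
      rcases h with hlt | ⟨rfl, hrec⟩
      · right; exact List.Lex.rel (idx_asc (hp x (by simp)) (hq y (by simp)) hlt)
      · rcases ih ys hrec (fun a ha => hp a (by simp [ha])) (fun a ha => hq a (by simp [ha])) with heq | hlex
        · left; simp [heq]
        · right; exact List.Lex.cons hlex
  rcases key p q h hp hq with heq | hlex
  · exact le_of_eq heq
  · exact le_of_lt ((List.lt_iff_lex_lt _ _).mpr hlex)

lemma lexLeK_ge {p q : List Int} (h : LexLeK desc09 p q) (hlen : p.length = q.length)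
    (hp : ∀ x ∈ p, x ∈ digits09) (hq : ∀ x ∈ q, x ∈ digits09) :
    joinDigits q ≤ joinDigits p := by
  rw [String.le_iff_toList_le, toList_joinDigits hq, toList_joinDigits hp]
  have key : ∀ (p q : List Int), LexLeK desc09 p q → p.length = q.length →
      (∀ x ∈ p, x ∈ digits09) → (∀ x ∈ q, x ∈ digits09) →
      q.map digChar = p.map digChar ∨ List.Lex (· < ·) (q.map digChar) (p.map digChar) := by
    intro p
    induction p with
    | nil =>
      intro q _ hl _ _
      obtain rfl : q = [] := List.length_eq_zero_iff.mp hl.symm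
      left; rfl
    | cons x xs ih =>
      intro q h hl hp hq
      rcases q with _|⟨y, ys⟩; · exact absurd h (by simp [LexLeK])
      rcases h with hlt | ⟨rfl, hrec⟩
      · right; exact List.Lex.rel (idx_desc (hp x (by simp)) (hq y (by simp)) hlt)
      · rcases ih ys hrec (by simpa using hl) (fun a ha => hp a (by simp [ha])) (fun a ha => hq a (by simp [ha])) with heq | hlex
        · left; simp [heq]
        · right; exact List.Lex.cons hlex
  rcases key p q h hlen hp hq with heq | hlex
  · exact le_of_eq heq
  · exact le_of_lt ((List.lt_iff_lex_lt _ _).mpr hlex)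

lemma mem_desc {x : Int} (h : x ∈ digits09) : x ∈ desc09 := by fin_cases h <;> decide

theorem main (k : Int) (array : List String) (hk1 : -1 ≤ k) (hk9 : k ≤ 9)
    (_hklen : k ≤ (array.length : Int)) : solution k array = solution_alt k array := by
  have hr1 : PySem.List.pyRange 0 10 1 = digits09 := by decide
  have hr2 : PySem.List.pyRange 9 (-1) (-1) = desc09 := by decide
  simp only [solution, solution_alt, hr1, hr2]
  set n := (k+1).toNat with hn
  have hchk : ∀ p : List Int, p.length = n → (chkA array p 0 k.toNat = true ↔ ChainOK array p) := by
    intro p hl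
    rw [chkA_iff]
    simp only [zero_add]
    constructor
    · intro h i hi; exact h i (by omega)
    · intro h j hj; exact h j (by omega)
  have hval : ∀ p, (p ∈ (PySem.List.permutations digits09 n).filter
      (fun p => chkA array p 0 k.toNat)) ↔ ValidExt array n p := by
    intro p
    rw [List.mem_filter, mem_perms n digits09 (by decide) p]
    constructor
    · rintro ⟨⟨hl, hnd, hsub⟩, hc⟩
      exact ⟨hl, hnd, hsub, (hchk p hl).mp hc⟩
    · rintro ⟨hl, hnd, hsub, hc⟩
      exact ⟨⟨hl, hnd, hsub⟩, (hchk p hl).mpr hc⟩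
  by_cases hex : ∃ e, ValidExt array n e
  · obtain ⟨e0, hel, hen, hes, hec⟩ := hex
    have hExtA : ExtOf array digits09 n digits09 [] e0 :=
      ⟨hel, by simpa using hen, by simpa using hec, hes, fun e he => hes e (List.mem_of_mem_head? he)⟩
    have hExtD : ExtOf array desc09 n desc09 [] e0 :=
      ⟨hel, by simpa using hen, by simpa using hec, fun x hx => mem_desc (hes x hx),
        fun e he => mem_desc (hes e (List.mem_of_mem_head? he))⟩
    obtain ⟨rm, hrm⟩ : ∃ r, dfsB array digits09 n digits09 [] = some r := by
      cases h : dfsB array digits09 n digits09 [] with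
      | none => exact absurd hExtA (dfs_complete h e0)
      | some r => exact ⟨r, rfl⟩
    obtain ⟨rM, hrM⟩ : ∃ r, dfsB array desc09 n desc09 [] = some r := by
      cases h : dfsB array desc09 n desc09 [] with
      | none => exact absurd hExtD (dfs_complete h e0)
      | some r => exact ⟨r, rfl⟩
    have hchain0 : ChainOK array [] := by intro i hi; simp at hi
    obtain ⟨hrmlen, hrmnd, hrmch, hrmmem⟩ := dfs_sound hrm (fun x hx => hx) (by simp) hchain0
    obtain ⟨hrMlen, hrMnd, hrMch, hrMmem⟩ := dfs_sound hrM (fun x hx => hx) (by simp) hchain0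
    have hrmsub : ∀ x ∈ rm, x ∈ digits09 := fun x hx => (hrmmem x hx).resolve_left (by simp)
    have hrMsub : ∀ x ∈ rM, x ∈ digits09 := fun x hx => by
      have := (hrMmem x hx).resolve_left (by simp)
      fin_cases this <;> decide
    have hrmval : ValidExt array n rm := ⟨by simpa using hrmlen, hrmnd, hrmsub, hrmch⟩
    have hrMval : ValidExt array n rM := ⟨by simpa using hrMlen, hrMnd, hrMsub, hrMch⟩
    have hmmM : joinDigits rM ∈ ((PySem.List.permutations digits09 n).filter
        (fun p => chkA array p 0 k.toNat)).map joinDigits :=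
      List.mem_map_of_mem ((hval rM).mpr hrMval)
    have hmmm : joinDigits rm ∈ ((PySem.List.permutations digits09 n).filter
        (fun p => chkA array p 0 k.toNat)).map joinDigits :=
      List.mem_map_of_mem ((hval rm).mpr hrmval)
    obtain ⟨m, hm⟩ : ∃ m, PySem.List.min? (((PySem.List.permutations digits09 n).filter
        (fun p => chkA array p 0 k.toNat)).map joinDigits) (fun s => s) = some m := by
      cases h : PySem.List.min? (((PySem.List.permutations digits09 n).filter
        (fun p => chkA array p 0 k.toNat)).map joinDigits) (fun s => s) with
      | none => rw [PySem.List.min?_eq_none_iff] at h; rw [h] at hmmm; simp at hmmm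
      | some m => exact ⟨m, rfl⟩
    obtain ⟨M, hM⟩ : ∃ M, PySem.List.max? (((PySem.List.permutations digits09 n).filter
        (fun p => chkA array p 0 k.toNat)).map joinDigits) (fun s => s) = some M := by
      cases h : PySem.List.max? (((PySem.List.permutations digits09 n).filter
        (fun p => chkA array p 0 k.toNat)).map joinDigits) (fun s => s) with
      | none => rw [PySem.List.max?_eq_none_iff] at h; rw [h] at hmmm; simp at hmmm
      | some M => exact ⟨M, rfl⟩
    obtain ⟨q, hqmem, rfl⟩ := List.mem_map.mp (PySem.List.min?_mem hm)
    obtain ⟨Q, hQmem, rfl⟩ := List.mem_map.mp (PySem.List.max?_mem hM)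
    have hqval := (hval q).mp hqmem
    have hQval := (hval Q).mp hQmem
    have hlexm : LexLeK digits09 rm q := by
      have := dfs_min (by decide) hrm ⟨[], rfl⟩ q
        ⟨hqval.1, by simpa using hqval.2.1, by simpa using hqval.2.2.2, hqval.2.2.1,
          fun e he => hqval.2.2.1 e (List.mem_of_mem_head? he)⟩
      simpa using this
    have hlexM : LexLeK desc09 rM Q := by
      have := dfs_min (by decide) hrM ⟨[], rfl⟩ Q
        ⟨hQval.1, by simpa using hQval.2.1, by simpa using hQval.2.2.2,
          fun x hx => mem_desc (hQval.2.2.1 x hx),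
          fun e he => mem_desc (hQval.2.2.1 e (List.mem_of_mem_head? he))⟩
      simpa using this
    have h1 : joinDigits rm ≤ joinDigits q :=
      lexLeK_le hlexm (by rw [hrmval.1, hqval.1]) hrmsub hqval.2.2.1
    have h2 : joinDigits q ≤ joinDigits rm := PySem.List.min?_isMin hm _ hmmm
    have h3 : joinDigits Q ≤ joinDigits rM :=
      lexLeK_ge hlexM (by rw [hrMval.1, hQval.1]) hrMsub hQval.2.2.1
    have h4 : joinDigits rM ≤ joinDigits Q := PySem.List.max?_isMax hM _ hmmM
    rw [hm, hM, hrm, hrM]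
    simp only [Option.getD_some, List.cons.injEq, and_true]
    exact ⟨le_antisymm h4 h3 ▸ rfl, le_antisymm h2 h1 ▸ rfl⟩
  · have hfe : ((PySem.List.permutations digits09 n).filter (fun p => chkA array p 0 k.toNat)) = [] := by
      rw [List.filter_eq_nil_iff]
      intro p hp hc
      exact hex ⟨p, (hval p).mp (List.mem_filter.mpr ⟨hp, hc⟩)⟩
    have hnone1 : dfsB array digits09 n digits09 [] = none := by
      cases h : dfsB array digits09 n digits09 [] with
      | none => rfl
      | some r =>
        exfalso
        obtain ⟨hl, hnd, hch, hmem⟩ := dfs_sound h (fun x hx => hx) (by simp)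
          (by intro i hi; simp at hi)
        exact hex ⟨r, by simpa using hl, hnd,
          fun x hx => (hmem x hx).resolve_left (by simp), hch⟩
    have hnone2 : dfsB array desc09 n desc09 [] = none := by
      cases h : dfsB array desc09 n desc09 [] with
      | none => rfl
      | some r =>
        exfalso
        obtain ⟨hl, hnd, hch, hmem⟩ := dfs_sound h (fun x hx => hx) (by simp)
          (by intro i hi; simp at hi)
        refine hex ⟨r, by simpa using hl, hnd, fun x hx => ?_, hch⟩
        have := (hmem x hx).resolve_left (by simp)
        fin_cases this <;> decide
    rw [hfe, hnone1, hnone2]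
    simp only [List.map_nil]
    have e1 : PySem.List.max? ([] : List String) (fun s => s) = none := rfl
    have e2 : PySem.List.min? ([] : List String) (fun s => s) = none := rfl
    rw [e1, e2]
    rfl

-- ===== VERDICT (by name: the statement is the Claim_ definition above) =====
theorem solution_spec : Claim_equal_solution := by
  intro k array _hdom hpre
  obtain ⟨h1, h2, h3⟩ := hpre
  show solution k array = solution_alt k array
  exact main k array h1 h2 (by simpa [PySem.List.len_eq] using h3)
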